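-- pv_equiv track=rewrite | github.com/chen-ye/treeviz | backend/src/foliage/phenology/adjustments.py | shift_color_timeline
-- ===== SOURCE A (Python) =====
-- def shift_color_timeline(timeline: list[tuple[int, int, int]], days: int) -> list[tuple[int, int, int]]:
--     """
--     Shift a color timeline by a number of days.
--
--     Args:
--         timeline: List of 365/366 (R, G, B) tuples
--         days: Number of days to shift (negative = earlier, positive = later)
--
--     Returns:
--         Shifted timeline (same length as input)
--     """
--     if days == 0 or not timeline:
--         return timeline
--
--     length = len(timeline)
--     shifted = []
--
--     for i in range(length):
--         # Map current day to source day
--         source_index = (i - days) % length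
--         shifted.append(timeline[source_index])
--
--     return shifted
-- ===== SOURCE B (Python) =====
-- def shift_color_timeline(timeline: list[tuple[int, int, int]], days: int) -> list[tuple[int, int, int]]:
--     """Shift a color timeline by a number of days (slice-rotation form)."""
--     if days == 0 or not timeline:
--         return timeline
--     k = (-days) % len(timeline)
--     return timeline[k:] + timeline[:k]
-- ===== Notes on version B (the rewrite author's own statement) =====
-- stated objective: idiomatic
-- what changed: Replaces the per-element loop that applies a modulo to every index with one split-point computation k = (-days) % len(timeline) and a concatenation of two bulk slices timeline[k:] + timeline[:k].
import Mathlib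
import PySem

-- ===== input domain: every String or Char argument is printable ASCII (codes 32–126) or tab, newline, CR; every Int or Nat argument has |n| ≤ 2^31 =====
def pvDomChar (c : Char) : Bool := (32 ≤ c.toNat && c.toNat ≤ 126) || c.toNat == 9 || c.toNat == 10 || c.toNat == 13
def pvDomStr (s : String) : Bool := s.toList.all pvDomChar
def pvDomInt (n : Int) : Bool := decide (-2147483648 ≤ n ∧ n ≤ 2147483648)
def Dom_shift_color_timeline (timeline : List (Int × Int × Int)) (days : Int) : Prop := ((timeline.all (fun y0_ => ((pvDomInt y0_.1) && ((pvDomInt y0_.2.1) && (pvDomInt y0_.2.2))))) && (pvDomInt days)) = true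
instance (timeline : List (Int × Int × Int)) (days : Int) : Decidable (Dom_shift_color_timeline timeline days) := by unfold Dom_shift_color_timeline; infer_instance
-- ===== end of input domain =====

-- B replaces A's per-index modulo loop with one split index and two bulk slices (idiomatic rotation).
-- ===== PORT A =====
-- pyGetD's default is never used: the source index (i - days) % length is always in range (length > 0 here).
def shift_color_timeline (timeline : List (Int × Int × Int)) (days : Int) : List (Int × Int × Int) :=
  if days = 0 ∨ timeline = [] then timeline
  else
    let length : Int := timeline.length
    (PySem.List.pyRange 0 length 1).foldl
      (fun shifted i =>
        shifted ++ [PySem.List.pyGetD timeline (PySem.Int.mod (i - days) length) (0, 0, 0)]) []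

-- ===== PORT B =====
def shift_color_timeline_alt (timeline : List (Int × Int × Int)) (days : Int) : List (Int × Int × Int) :=
  if days = 0 ∨ timeline = [] then timeline
  else
    let k : Int := PySem.Int.mod (-days) timeline.length
    PySem.List.slice timeline (some k) none ++ PySem.List.slice timeline none (some k)

-- ===== PRECONDITION & SPEC =====
def Spec_shift_color_timeline (timeline : List (Int × Int × Int)) (days : Int) (out : List (Int × Int × Int)) : Prop := out = shift_color_timeline_alt timeline days
instance (timeline : List (Int × Int × Int)) (days : Int) (out : List (Int × Int × Int)) : Decidable (Spec_shift_color_timeline timeline days out) := by unfold Spec_shift_color_timeline; infer_instance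

-- ===== CLAIM (what is proved, stated in full; the proofs are below) =====
def Claim_equal_shift_color_timeline : Prop := ∀ (timeline : List (Int × Int × Int)) (days : Int), Dom_shift_color_timeline timeline days → Spec_shift_color_timeline timeline days (shift_color_timeline timeline days)

-- ===== LEMMAS AND PROOFS =====

-- ===== VERDICT (by name: the statement is the Claim_ definition above) =====
lemma rot_main (timeline : List (Int × Int × Int)) (days : Int)
    (hd : ¬ (days = 0 ∨ timeline = [])) :
    shift_color_timeline timeline days = shift_color_timeline_alt timeline days := by
  have hne : timeline ≠ [] := fun h => hd (Or.inr h)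
  have hn : 0 < timeline.length := List.length_pos_iff.mpr hne
  unfold shift_color_timeline shift_color_timeline_alt
  rw [if_neg hd, if_neg hd]
  show (PySem.List.pyRange 0 (timeline.length:Int) 1).foldl
      (fun shifted i => shifted ++ [PySem.List.pyGetD timeline (PySem.Int.mod (i - days) (timeline.length:Int)) (0,0,0)]) []
    = PySem.List.slice timeline (some (PySem.Int.mod (-days) (timeline.length:Int))) none
      ++ PySem.List.slice timeline none (some (PySem.Int.mod (-days) (timeline.length:Int)))
  set n : Nat := timeline.length with hnn
  have hnI : (0:Int) < (n:Int) := by exact_mod_cast hn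
  set k : Int := PySem.Int.mod (-days) (n:Int) with hk
  have hk0 : 0 ≤ k := PySem.Int.mod_nonneg _ hnI
  have hkn : k < n := PySem.Int.mod_lt _ hnI
  have hkmod : k = (-days) % (n:Int) := by
    rw [hk, PySem.Int.mod_eq_emod_of_pos hnI]
  clear_value k
  rw [PySem.List.foldl_append_singleton_eq_map, List.nil_append]
  rw [PySem.List.slice_from _ hk0, PySem.List.slice_to _ hk0]
  have hkNat : k.toNat < n := by omega
  apply List.ext_getElem
  · simp [PySem.List.length_pyRange_one]
    omega
  · intro j h1 h2
    have hj : j < n := by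
      simpa [PySem.List.length_pyRange_one] using h1
    rw [List.getElem_map, PySem.List.getElem_pyRange_one]
    have hsrc : PySem.Int.mod ((0 + (j:Int)) - days) (n:Int)
        = if j + k.toNat < n then ((j + k.toNat : Nat) : Int) else ((j + k.toNat - n : Nat) : Int) := by
      rw [PySem.Int.mod_eq_emod_of_pos hnI]
      obtain ⟨q, hq⟩ : ∃ q, -days = (n:Int) * q + k := ⟨(-days) / (n:Int), by rw [hkmod]; exact (Int.mul_ediv_add_emod (-days) (n:Int)).symm⟩
      have hsplit : (0:Int) + (j:Int) - days = ((j:Int) + k) + (n:Int) * q := by omega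
      rw [hsplit, Int.add_mul_emod_self_left]
      by_cases hc : j + k.toNat < n
      · have h1 : (0:Int) ≤ (j:Int) + k := by omega
        have h2 : (j:Int) + k < (n:Int) := by omega
        rw [if_pos hc, Int.emod_eq_of_lt h1 h2]
        push_cast; omega
      · rw [if_neg hc]
        have hstep : ((j:Int) + k) % (n:Int) = ((j:Int) + k - n) % (n:Int) := by
          conv_lhs => rw [show (j:Int) + k = ((j:Int) + k - n) + (n:Int) * 1 by ring]
          rw [Int.add_mul_emod_self_left]
        have h1 : (0:Int) ≤ (j:Int) + k - n := by omega
        have h2 : (j:Int) + k - n < (n:Int) := by omega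
        rw [hstep, Int.emod_eq_of_lt h1 h2]
        omega
    rw [hsrc]
    by_cases hc : j + k.toNat < n
    · rw [if_pos hc, PySem.List.pyGetD_natCast, List.getElem_append_left (by simp; omega),
        List.getElem_drop]
      rw [List.getD_eq_getElem _ _ (by omega)]
      congr 1
      omega
    · rw [if_neg hc, PySem.List.pyGetD_natCast, List.getElem_append_right (by simp; omega)]
      rw [List.getElem_take, List.getD_eq_getElem _ _ (by omega)]
      congr 1
      simp
      omega

theorem shift_color_timeline_spec : Claim_equal_shift_color_timeline := by
  intro timeline days _
  unfold Spec_shift_color_timeline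
  by_cases hd : days = 0 ∨ timeline = []
  · simp [shift_color_timeline, shift_color_timeline_alt, hd]
  · exact rot_main timeline days hd
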